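-- pv_equiv track=rewrite | github.com/joshstephen18/dna_sequence_analyzer | main.py | find_restriction_sites
-- ===== SOURCE A (Python) =====
-- def find_restriction_sites(sequence, enzymes):
--     results = {}
--     for enzyme, site in enzymes.items():  #this creates the outer loop to pick an enzyme
--         positions = []
--         start = 0
--         while True: #creates the inner loop to scan the DNA
--             pos = sequence.find (site, start)  #.find(value, start, end) is used to locate location of specific substring
--             if pos == -1:    #note: in python, if .find() can't find the pattern, it returns -1
--                 break #if the pattern isn't found, the while loop is stopped and code moves onto next enzyme
--             positions.append (pos+1)  #if pattern was found, append the location to our list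
--             start = pos + 1 #updates starting point so we can look for the next occurrence of the same enzyme later in the string
--             #position will reflect 1-based biological position instead of 0-based indexing
--
--         results[enzyme] = positions #saves list of positions to our results dictionary under the enzyme's name
--     return results
-- ===== SOURCE B (Python) =====
-- def find_restriction_sites(sequence, enzymes):
--     n = len(sequence)
--     results = {}
--     for enzyme, site in enzymes.items():
--         m = len(site)
--         results[enzyme] = [i + 1 for i in range(n - m + 1) if sequence.startswith(site, i)]
--     return results
-- ===== Notes on version B (the rewrite author's own statement) =====
-- stated objective: alternative
-- what changed: A's inner while-loop that jumps via sequence.find(site, start) is replaced by a per-enzyme list comprehension scanning every candidate start index i and testing sequence.startswith(site, i).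
import Mathlib
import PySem

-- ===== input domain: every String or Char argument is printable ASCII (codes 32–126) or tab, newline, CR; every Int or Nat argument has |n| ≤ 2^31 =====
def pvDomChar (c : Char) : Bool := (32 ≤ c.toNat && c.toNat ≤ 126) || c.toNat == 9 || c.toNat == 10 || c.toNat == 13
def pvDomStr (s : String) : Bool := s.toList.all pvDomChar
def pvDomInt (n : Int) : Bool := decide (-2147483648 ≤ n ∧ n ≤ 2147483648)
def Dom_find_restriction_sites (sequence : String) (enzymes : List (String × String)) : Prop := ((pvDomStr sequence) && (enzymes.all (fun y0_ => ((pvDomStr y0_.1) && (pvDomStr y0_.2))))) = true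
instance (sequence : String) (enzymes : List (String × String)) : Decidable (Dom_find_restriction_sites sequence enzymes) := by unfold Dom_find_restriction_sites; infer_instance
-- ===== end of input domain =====

-- B replaces A's while/str.find jumping loop by a per-enzyme comprehension that
-- scans every candidate start index i and tests startswith(site, i) (objective: alternative).


-- ===== PORT A =====
-- A's inner while-loop: repeatedly sequence.find(site, start), append pos+1, start = pos+1.
-- fuel = len(sequence)+2 bounds the iteration count (each found pos is strictly larger, pos ≤ len);
-- the fuel guard only makes the same computation total.
def pvSiteLoopA (s site : List Char) : Nat → Int → List Int
  | 0, _ => []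
  | fuel + 1, start =>
      let pos := PySem.Chars.findFrom s site start
      if pos = -1 then []
      else (pos + 1) :: pvSiteLoopA s site fuel (pos + 1)

def find_restriction_sites (sequence : String) (enzymes : List (String × String)) : List (String × List Int) :=
  (enzymes.foldl
    (fun (results : PySem.Dict String (List Int)) p =>
      results.insert p.1 (pvSiteLoopA sequence.toList p.2.toList (sequence.toList.length + 2) 0))
    PySem.Dict.empty).items

-- ===== PORT B =====
-- B's inner comprehension: [i+1 for i in range(n-m+1) if sequence.startswith(site, i)]
-- hand port of Python's str.startswith(site, i): for 0 ≤ i (which range guarantees here)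
-- it is exactly "site is a prefix of the characters from i on".
def pvSiteScanB (s site : List Char) : List Int :=
  ((PySem.List.pyRange 0 ((s.length : Int) - (site.length : Int) + 1) 1).filter
      (fun i => site.isPrefixOf (s.drop i.toNat))).map
    (fun i => i + 1)

def find_restriction_sites_alt (sequence : String) (enzymes : List (String × String)) : List (String × List Int) :=
  (enzymes.foldl
    (fun (results : PySem.Dict String (List Int)) p =>
      results.insert p.1 (pvSiteScanB sequence.toList p.2.toList))
    PySem.Dict.empty).items

-- ===== PRECONDITION & SPEC =====
def Spec_find_restriction_sites (sequence : String) (enzymes : List (String × String)) (out : List (String × List Int)) : Prop := out = find_restriction_sites_alt sequence enzymes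
instance (sequence : String) (enzymes : List (String × String)) (out : List (String × List Int)) : Decidable (Spec_find_restriction_sites sequence enzymes out) := by unfold Spec_find_restriction_sites; infer_instance

-- ===== CLAIM (what is proved, stated in full; the proofs are below) =====
def Claim_equal_find_restriction_sites : Prop := ∀ (sequence : String) (enzymes : List (String × String)), Dom_find_restriction_sites sequence enzymes → Spec_find_restriction_sites sequence enzymes (find_restriction_sites sequence enzymes)

-- ===== LEMMAS AND PROOFS =====

-- CPython quirk kept by PySem: find with a start past len(s) is -1 even for site = ''.
lemma findFrom_past_end (s site : List Char) (start : Int) (h : (s.length : Int) < start) :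
    PySem.Chars.findFrom s site start = -1 := by
  have h0 : ¬ start < 0 := by omega
  simp only [PySem.Chars.findFrom, h0, if_false]
  rw [if_pos h]

-- B's startswith test at a natural index is exactly "site is a prefix of s.drop j"
lemma match_iff (s site : List Char) (j : Nat) :
    (site.isPrefixOf (s.drop ((j : Int)).toNat)) = true ↔ site <+: s.drop j := by
  rw [Int.toNat_natCast, List.isPrefixOf_iff_prefix]

lemma prefix_drop_infix (s site : List Char) (k j : Nat) (hk : k ≤ j)
    (h : site <+: s.drop j) : site <:+: s.drop k := by
  have : s.drop j = (s.drop k).drop (j - k) := by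
    rw [List.drop_drop]; congr 1; omega
  rw [this] at h
  exact h.isInfix.trans (List.drop_suffix _ _).isInfix

-- main loop invariant: from any reachable start k with enough fuel, A's loop produces
-- exactly B's filtered tail of the candidate range
lemma loop_eq_scan (s site : List Char) (fuel : Nat) :
    ∀ k : Nat, k ≤ s.length + 1 → s.length + 2 ≤ fuel + k →
    pvSiteLoopA s site fuel (k : Int) =
      ((PySem.List.pyRange (k : Int) ((s.length : Int) - (site.length : Int) + 1) 1).filter
          (fun i => site.isPrefixOf (s.drop i.toNat))).map
        (fun i => i + 1) := by
  induction fuel with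
  | zero => intro k hk hf; omega
  | succ fuel ih =>
    intro k hk hf
    by_cases hkn : k ≤ s.length
    · rcases eq_or_ne (PySem.Chars.findFrom s site (k : Int)) (-1) with hr | hr
      · -- no further match: loop stops, and every remaining candidate fails the slice test
        have hnone : ¬ site <:+: s.drop k :=
          (PySem.Chars.findFrom_natCast_eq_neg_one_iff s site k hkn).mp hr
        rw [show pvSiteLoopA s site (fuel + 1) (k : Int) = [] from by simp [pvSiteLoopA, hr]]
        symm
        rw [List.map_eq_nil_iff, List.filter_eq_nil_iff]
        intro i hi
        have hmem := (PySem.List.mem_pyRange_one.mp hi)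
        have hi0 : 0 ≤ i := le_trans (by exact_mod_cast Nat.zero_le k) hmem.1
        set j := i.toNat with hj
        have hij : i = (j : Int) := by omega
        rw [List.isPrefixOf_iff_prefix]
        intro hpre
        exact hnone (prefix_drop_infix s site k j (by omega) hpre)
      · -- a match at r = findFrom: candidates in [k, r) fail, r succeeds, recurse from r+1
        obtain ⟨hkr, hpre, hmin⟩ := PySem.Chars.findFrom_natCast_spec s site k hkn hr
        set r := PySem.Chars.findFrom s site (k : Int) with hrdef
        have hr0 : 0 ≤ r := le_trans (by exact_mod_cast Nat.zero_le k) hkr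
        have hrn : r = (r.toNat : Int) := by omega
        have hrle : r.toNat ≤ s.length := by
          by_contra hgt
          have hdrop : s.drop r.toNat = [] := List.drop_eq_nil_of_le (by omega)
          have hsite : site = [] := List.prefix_nil.mp (hdrop ▸ hpre)
          exact hmin k (le_refl k) (by omega) (by simp [hsite])
        have hlen : site.length ≤ s.length - r.toNat := by
          have := hpre.length_le
          simpa using this
        have hrm : r.toNat + site.length ≤ s.length := by omega
        simp only [pvSiteLoopA]
        rw [← hrdef, if_neg hr]
        have hsplit1 : PySem.List.pyRange (k : Int) ((s.length : Int) - (site.length : Int) + 1) 1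
            = PySem.List.pyRange (k : Int) r 1 ++ PySem.List.pyRange r ((s.length : Int) - (site.length : Int) + 1) 1 :=
          PySem.List.pyRange_one_append _ _ _ hkr (by omega)
        have hsplit2 : PySem.List.pyRange r ((s.length : Int) - (site.length : Int) + 1) 1
            = r :: PySem.List.pyRange (r + 1) ((s.length : Int) - (site.length : Int) + 1) 1 :=
          PySem.List.pyRange_one_cons (by omega)
        rw [hsplit1, hsplit2, List.filter_append]
        have hfail : (PySem.List.pyRange (k : Int) r 1).filter
            (fun i => site.isPrefixOf (s.drop i.toNat)) = [] := by
          rw [List.filter_eq_nil_iff]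
          intro i hi
          have hmem := (PySem.List.mem_pyRange_one.mp hi)
          have hi0 : 0 ≤ i := le_trans (by exact_mod_cast Nat.zero_le k) hmem.1
          set j := i.toNat with hj
          have hij : i = (j : Int) := by omega
          rw [List.isPrefixOf_iff_prefix]
          exact hmin j (by omega) (by omega)
        have hok : (site.isPrefixOf (s.drop r.toNat)) = true := by
          rw [hrn, match_iff]
          rw [hrn] at hpre; exact hpre
        rw [hfail]
        simp only [List.nil_append, List.filter_cons]
        rw [if_pos hok]
        simp only [List.map_cons]
        congr 1
        have hcast : r + 1 = ((r.toNat + 1 : Nat) : Int) := by omega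
        rw [hcast]
        exact ih (r.toNat + 1) (by omega) (by omega)
    · -- start past the end of the string: find is -1 and the candidate range is empty
      have hk1 : k = s.length + 1 := by omega
      have hfind := findFrom_past_end s site (k : Int) (by exact_mod_cast by omega)
      rw [show pvSiteLoopA s site (fuel + 1) (k : Int) = [] from by simp [pvSiteLoopA, hfind]]
      rw [PySem.List.pyRange_one_eq_nil (by push_cast [hk1]; omega)]
      simp

lemma site_eq (s site : List Char) : pvSiteLoopA s site (s.length + 2) 0 = pvSiteScanB s site := by
  have := loop_eq_scan s site (s.length + 2) 0 (by omega) (by omega)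
  simpa [pvSiteScanB] using this

-- ===== VERDICT (by name: the statement is the Claim_ definition above) =====
theorem find_restriction_sites_spec : Claim_equal_find_restriction_sites := by
  intro sequence enzymes _
  unfold Spec_find_restriction_sites find_restriction_sites find_restriction_sites_alt
  simp only [site_eq]
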